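-- pv_equiv track=rewrite | github.com/vadim-zyamalov/advent-of-code | 2019/day-22/part1.py | pow_polinome
-- ===== SOURCE A (Python) =====
-- def pow_polinome(a, b, P, N):
--     if P == 1:
--         return a, b
--     if P % 2 == 0:
--         return pow_polinome((a * a) % N, (a * b + b) % N, P // 2, N)
--     else:
--         c, d = pow_polinome(a, b, P - 1, N)
--         return (a * c) % N, (a * d + b) % N
-- ===== SOURCE B (Python) =====
-- def pow_polinome(a, b, P, N):
--     # Iterative exponentiation-by-squaring of the affine map f(x) = a*x + b (mod N).
--     if P == 1:
--         return a, b
--     ra, rb = 1, 0          # accumulator: identity map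
--     ba, bb = a % N, b % N  # base: f reduced mod N
--     e = P
--     while e > 0:
--         if e % 2 == 1:
--             ra, rb = (ba * ra) % N, (ba * rb + bb) % N
--         ba, bb = (ba * ba) % N, (ba * bb + bb) % N
--         e //= 2
--     return ra, rb
-- ===== Notes on version B (the rewrite author's own statement) =====
-- stated objective: alternative
-- what changed: Replaced A's non-tail recursion on P (squaring the map on even P, peeling one composition on odd P) by an iterative exponentiation-by-squaring loop over the bits of P that maintains an explicit (accumulator, base) pair of affine coefficients.
import Mathlib
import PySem

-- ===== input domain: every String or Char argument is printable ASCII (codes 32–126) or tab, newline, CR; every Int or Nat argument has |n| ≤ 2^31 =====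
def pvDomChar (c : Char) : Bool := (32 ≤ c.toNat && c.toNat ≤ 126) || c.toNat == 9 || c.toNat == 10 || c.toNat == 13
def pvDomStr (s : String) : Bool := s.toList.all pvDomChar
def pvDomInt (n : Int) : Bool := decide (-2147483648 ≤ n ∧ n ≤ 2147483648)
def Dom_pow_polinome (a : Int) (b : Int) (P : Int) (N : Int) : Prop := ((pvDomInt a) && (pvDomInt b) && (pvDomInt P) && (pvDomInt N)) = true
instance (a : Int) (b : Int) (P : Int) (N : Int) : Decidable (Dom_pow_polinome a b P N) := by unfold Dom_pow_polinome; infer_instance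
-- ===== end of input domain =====

-- B replaces A's non-tail even/odd recursion on P by an iterative exponentiation-by-squaring loop
-- over the bits of P with an explicit (accumulator, base) pair of affine coefficients (objective: alternative).

-- ===== PORT A =====
-- A recurses on P; for P ≤ 0 Python never returns (infinite recursion → RecursionError),
-- so those inputs are outside Pre_ and the `P ≤ 1` guard here exists only to make the
-- recursion total (it coincides with Python's `P == 1` branch on all of Pre_).
def pow_polinome (a : Int) (b : Int) (P : Int) (N : Int) : Int × Int :=
  if _h : P ≤ 1 then (a, b)
  else if PySem.Int.mod P 2 == 0 then
    pow_polinome (PySem.Int.mod (a * a) N) (PySem.Int.mod (a * b + b) N) (PySem.Int.floordiv P 2) N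
  else
    let cd := pow_polinome a b (P - 1) N
    (PySem.Int.mod (a * cd.1) N, PySem.Int.mod (a * cd.2 + b) N)
termination_by P.toNat
decreasing_by
  · have : PySem.Int.floordiv P 2 = P / 2 := PySem.Int.floordiv_eq_ediv_of_pos (by norm_num)
    rw [this]; omega
  · omega

-- ===== PORT B =====
-- the while-loop of Source B: state (e, ra, rb, ba, bb)
def powLoop (N : Int) (e : Int) (ra : Int) (rb : Int) (ba : Int) (bb : Int) : Int × Int :=
  if _h : e ≤ 0 then (ra, rb)
  else
    let acc := if PySem.Int.mod e 2 == 1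
               then (PySem.Int.mod (ba * ra) N, PySem.Int.mod (ba * rb + bb) N)
               else (ra, rb)
    powLoop N (PySem.Int.floordiv e 2) acc.1 acc.2 (PySem.Int.mod (ba * ba) N) (PySem.Int.mod (ba * bb + bb) N)
termination_by e.toNat
decreasing_by
  have : PySem.Int.floordiv e 2 = e / 2 := PySem.Int.floordiv_eq_ediv_of_pos (by norm_num)
  rw [this]; omega

def pow_polinome_alt (a : Int) (b : Int) (P : Int) (N : Int) : Int × Int :=
  if P == 1 then (a, b)
  else powLoop N P 1 0 (PySem.Int.mod a N) (PySem.Int.mod b N)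

-- ===== PRECONDITION & SPEC =====
-- Pre_ excludes exactly the inputs where Python A raises: P ≤ 0 (infinite recursion →
-- RecursionError) and P ≥ 2 with N = 0 (ZeroDivisionError in `% N`).
def Pre_pow_polinome (a : Int) (b : Int) (P : Int) (N : Int) : Prop :=
  1 ≤ P ∧ (P = 1 ∨ N ≠ 0)
instance (a : Int) (b : Int) (P : Int) (N : Int) : Decidable (Pre_pow_polinome a b P N) := by
  unfold Pre_pow_polinome; infer_instance

def pvWitness_pow_polinome : Int × Int × Int × Int := (2, 3, 5, 7)

def Spec_pow_polinome (a : Int) (b : Int) (P : Int) (N : Int) (out : Int × Int) : Prop := out = pow_polinome_alt a b P N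
instance (a : Int) (b : Int) (P : Int) (N : Int) (out : Int × Int) : Decidable (Spec_pow_polinome a b P N out) := by unfold Spec_pow_polinome; infer_instance

-- ===== CLAIM (what is proved, stated in full; the proofs are below) =====
def Claim_equal_pow_polinome : Prop := ∀ (a : Int) (b : Int) (P : Int) (N : Int), Dom_pow_polinome a b P N → Pre_pow_polinome a b P N → Spec_pow_polinome a b P N (pow_polinome a b P N)

-- ===== LEMMAS AND PROOFS =====

-- congruence mod N as divisibility of the difference
def Cong (N x y : Int) : Prop := N ∣ (x - y)

lemma cong_of_eq {N x y : Int} (h : x = y) : Cong N x y := ⟨0, by simp [h]⟩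

lemma cong_refl (N x : Int) : Cong N x x := ⟨0, by simp⟩

lemma cong_symm {N x y : Int} (h : Cong N x y) : Cong N y x := by
  obtain ⟨k, hk⟩ := h; exact ⟨-k, by linarith⟩

lemma cong_trans {N x y z : Int} (h1 : Cong N x y) (h2 : Cong N y z) : Cong N x z := by
  obtain ⟨k, hk⟩ := h1; obtain ⟨l, hl⟩ := h2; exact ⟨k + l, by ring_nf; linarith⟩

lemma cong_add {N x x' y y' : Int} (h1 : Cong N x x') (h2 : Cong N y y') :
    Cong N (x + y) (x' + y') := by
  obtain ⟨k, hk⟩ := h1; obtain ⟨l, hl⟩ := h2; exact ⟨k + l, by ring_nf; linarith⟩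

lemma cong_mul {N x x' y y' : Int} (h1 : Cong N x x') (h2 : Cong N y y') :
    Cong N (x * y) (x' * y') := by
  obtain ⟨k, hk⟩ := h1; obtain ⟨l, hl⟩ := h2
  refine ⟨k * y + x' * l, ?_⟩
  have : x = x' + N * k := by linarith
  have : y = y' + N * l := by linarith
  subst_vars; ring

lemma cong_mod (N x : Int) : Cong N (PySem.Int.mod x N) x := by
  have h := PySem.Int.floordiv_mul_add_mod x N
  exact ⟨-(PySem.Int.floordiv x N), by linarith⟩

lemma mod_eq_of_cong {N x y : Int} (hN : N ≠ 0) (h : Cong N x y) :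
    PySem.Int.mod x N = PySem.Int.mod y N := by
  have hc : Cong N (PySem.Int.mod x N) (PySem.Int.mod y N) :=
    cong_trans (cong_mod N x) (cong_trans h (cong_symm (cong_mod N y)))
  obtain ⟨k, hk⟩ := hc
  rcases lt_or_gt_of_ne hN with hneg | hpos
  · obtain ⟨hx1, hx2⟩ := PySem.Int.mod_neg_bounds x hneg
    obtain ⟨hy1, hy2⟩ := PySem.Int.mod_neg_bounds y hneg
    have h1 : k < 1 := by nlinarith
    have h2 : -1 < k := by nlinarith
    have : k = 0 := by omega
    subst this; simp at hk; linarith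
  · have hx1 := PySem.Int.mod_nonneg x hpos
    have hx2 := PySem.Int.mod_lt x hpos
    have hy1 := PySem.Int.mod_nonneg y hpos
    have hy2 := PySem.Int.mod_lt y hpos
    have h1 : k < 1 := by nlinarith
    have h2 : -1 < k := by nlinarith
    have : k = 0 := by omega
    subst this; simp at hk; linarith

-- unreduced coefficients of the P-th self-composition of x ↦ a*x + b
def affpow (a b : Int) : Nat → Int × Int
  | 0 => (1, 0)
  | n + 1 => (a * (affpow a b n).1, a * (affpow a b n).2 + b)

lemma affpow_add (a b : Int) (m n : Nat) :
    affpow a b (m + n) = ((affpow a b m).1 * (affpow a b n).1,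
                          (affpow a b m).1 * (affpow a b n).2 + (affpow a b m).2) := by
  induction m with
  | zero => simp [affpow]
  | succ m ih =>
      have : m + 1 + n = (m + n) + 1 := by omega
      rw [this]
      simp only [affpow, ih]
      exact Prod.ext (by ring) (by ring)

lemma affpow_cong {N x x' y y' : Int} (hx : Cong N x x') (hy : Cong N y y') (n : Nat) :
    Cong N (affpow x y n).1 (affpow x' y' n).1 ∧ Cong N (affpow x y n).2 (affpow x' y' n).2 := by
  induction n with
  | zero => exact ⟨cong_refl N 1, cong_refl N 0⟩
  | succ n ih =>
      exact ⟨cong_mul hx ih.1, cong_add (cong_mul hx ih.2) hy⟩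

lemma affpow_scale (a b : Int) (s : Nat) (k : Nat) :
    affpow (affpow a b s).1 (affpow a b s).2 k = affpow a b (s * k) := by
  induction k with
  | zero => simp [affpow]
  | succ k ih =>
      have hs : s * (k + 1) = s + s * k := by ring
      rw [hs]
      conv_rhs => rw [affpow_add]
      simp only [affpow, ih]

lemma affpow_two_fst (a b : Int) : (affpow a b 2).1 = a * a := by simp [affpow]
lemma affpow_two_snd (a b : Int) : (affpow a b 2).2 = a * b + b := by simp [affpow]

lemma floordiv_two_natCast (n : Nat) :
    PySem.Int.floordiv (n : Int) 2 = ((n / 2 : Nat) : Int) := by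
  exact_mod_cast PySem.Int.floordiv_natCast n 2

lemma mod_two_natCast (n : Nat) :
    PySem.Int.mod (n : Int) 2 = ((n % 2 : Nat) : Int) := by
  exact_mod_cast PySem.Int.mod_natCast n 2

-- A computes the fully reduced coefficients of the P-th composition, for P ≥ 2
lemma A_eq (N : Int) (hN : N ≠ 0) :
    ∀ n : Nat, ∀ a b : Int, 2 ≤ n →
      pow_polinome a b (n : Int) N
        = (PySem.Int.mod (affpow a b n).1 N, PySem.Int.mod (affpow a b n).2 N) := by
  intro n
  induction n using Nat.strong_induction_on with
  | _ n IH =>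
    intro a b hn
    rw [pow_polinome]
    have hng : ¬ ((n : Int) ≤ 1) := by exact_mod_cast (by omega : ¬ (n ≤ 1))
    rw [dif_neg hng]
    by_cases hpar : n % 2 = 0
    · -- even branch
      have hmod : PySem.Int.mod (n : Int) 2 = 0 := by rw [mod_two_natCast, hpar]; rfl
      rw [hmod]
      simp only [beq_self_eq_true, if_true]
      rw [floordiv_two_natCast]
      set a' := PySem.Int.mod (a * a) N with ha'
      set b' := PySem.Int.mod (a * b + b) N with hb'
      have hcong : ∀ k : Nat, Cong N (affpow a' b' k).1 (affpow a b (2 * k)).1 ∧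
                               Cong N (affpow a' b' k).2 (affpow a b (2 * k)).2 := by
        intro k
        have h1 : Cong N a' (affpow a b 2).1 := by
          rw [affpow_two_fst]; exact cong_mod N (a * a)
        have h2 : Cong N b' (affpow a b 2).2 := by
          rw [affpow_two_snd]; exact cong_mod N (a * b + b)
        have := affpow_cong h1 h2 k
        rw [affpow_scale a b 2 k] at this
        exact this
      by_cases hk1 : n / 2 = 1
      · -- recursive call hits the P == 1 base case
        have hn2 : n = 2 := by omega
        subst hn2
        norm_num
        rw [pow_polinome]
        rw [dif_pos (by norm_num : (1 : Int) ≤ 1)]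
        rw [affpow_two_fst, affpow_two_snd]
      · have hk2 : 2 ≤ n / 2 := by omega
        rw [IH (n / 2) (by omega) a' b' hk2]
        have hdk : 2 * (n / 2) = n := by omega
        obtain ⟨hc1, hc2⟩ := hcong (n / 2)
        rw [hdk] at hc1 hc2
        exact Prod.ext (mod_eq_of_cong hN hc1) (mod_eq_of_cong hN hc2)
    · -- odd branch
      have hmod : PySem.Int.mod (n : Int) 2 = 1 := by
        rw [mod_two_natCast]; omega
      rw [hmod]
      norm_num
      have hcast : (n : Int) - 1 = ((n - 1 : Nat) : Int) := by omega
      rw [hcast, IH (n - 1) (by omega) a b (by omega)]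
      have hsucc : n = (n - 1) + 1 := by omega
      have e1 : (affpow a b n).1 = a * (affpow a b (n - 1)).1 := by
        conv_lhs => rw [hsucc]
        simp [affpow]
      have e2 : (affpow a b n).2 = a * (affpow a b (n - 1)).2 + b := by
        conv_lhs => rw [hsucc]
        simp [affpow]
      constructor
      · exact mod_eq_of_cong hN (by
          rw [e1]
          exact cong_mul (cong_refl N a) (cong_mod N _))
      · exact mod_eq_of_cong hN (by
          rw [e2]
          exact cong_add (cong_mul (cong_refl N a) (cong_mod N _)) (cong_refl N b))

-- B's loop: composing with the accumulator and squaring the base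
lemma loop_eq (N : Int) (hN : N ≠ 0) (a b : Int) :
    ∀ e : Nat, 1 ≤ e → ∀ s : Nat, ∀ ra rb ba bb : Int,
      Cong N ba (affpow a b s).1 → Cong N bb (affpow a b s).2 →
      powLoop N (e : Int) ra rb ba bb
        = (PySem.Int.mod ((affpow a b (s * e)).1 * ra) N,
           PySem.Int.mod ((affpow a b (s * e)).1 * rb + (affpow a b (s * e)).2) N) := by
  intro e
  induction e using Nat.strong_induction_on with
  | _ e IH =>
    intro he s ra rb ba bb hba hbb
    rw [powLoop]
    have heg : ¬ ((e : Int) ≤ 0) := by exact_mod_cast (by omega : ¬ (e ≤ 0))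
    rw [dif_neg heg]
    have hbsq1 : Cong N (PySem.Int.mod (ba * ba) N) (affpow a b (s + s)).1 := by
      rw [affpow_add]
      exact cong_trans (cong_mod N _) (cong_mul hba hba)
    have hbsq2 : Cong N (PySem.Int.mod (ba * bb + bb) N) (affpow a b (s + s)).2 := by
      rw [affpow_add]
      exact cong_trans (cong_mod N _) (cong_add (cong_mul hba hbb) hbb)
    by_cases hpar : e % 2 = 1
    · have hmod : PySem.Int.mod (e : Int) 2 = 1 := by rw [mod_two_natCast, hpar]; rfl
      rw [hmod]
      norm_num
      have hdiv : (e : Int) / 2 = ((e / 2 : Nat) : Int) := by omega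
      rw [hdiv]
      by_cases he1 : e = 1
      · subst he1
        norm_num
        rw [powLoop, dif_pos (by norm_num : (0 : Int) ≤ 0)]
        refine Prod.ext ?_ ?_
        · exact mod_eq_of_cong hN (by simpa using cong_mul hba (cong_refl N ra))
        · exact mod_eq_of_cong hN (by simpa using cong_add (cong_mul hba (cong_refl N rb)) hbb)
      · have hk : 1 ≤ e / 2 := by omega
        rw [IH (e / 2) (by omega) hk (s + s) _ _ _ _ hbsq1 hbsq2]
        have hsum : (s + s) * (e / 2) + s = s * e := by
          have : e = 2 * (e / 2) + 1 := by omega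
          calc (s + s) * (e / 2) + s = s * (2 * (e / 2) + 1) := by ring
            _ = s * e := by rw [← this]
        have hA := affpow_add a b ((s + s) * (e / 2)) s
        rw [hsum] at hA
        set m := (s + s) * (e / 2) with hm
        refine Prod.ext ?_ ?_
        · refine mod_eq_of_cong hN ?_
          rw [hA]
          refine cong_trans (cong_mul (cong_refl N (affpow a b m).1) (cong_mod N _)) ?_
          refine cong_trans (cong_mul (cong_refl N (affpow a b m).1)
            (cong_mul hba (cong_refl N ra))) (cong_of_eq (by ring))
        · refine mod_eq_of_cong hN ?_
          rw [hA]
          refine cong_trans (cong_add (cong_mul (cong_refl N (affpow a b m).1) (cong_mod N _))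
            (cong_refl N (affpow a b m).2)) ?_
          refine cong_trans (cong_add (cong_mul (cong_refl N (affpow a b m).1)
            (cong_add (cong_mul hba (cong_refl N rb)) hbb)) (cong_refl N (affpow a b m).2))
            (cong_of_eq (by ring))
    · have hpar0 : e % 2 = 0 := by omega
      have hmod : PySem.Int.mod (e : Int) 2 = 0 := by rw [mod_two_natCast, hpar0]; rfl
      rw [hmod]
      norm_num
      have hdiv : (e : Int) / 2 = ((e / 2 : Nat) : Int) := by omega
      rw [hdiv]
      have hk : 1 ≤ e / 2 := by omega
      rw [IH (e / 2) (by omega) hk (s + s) _ _ _ _ hbsq1 hbsq2]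
      have : (s + s) * (e / 2) = s * e := by
        have : e = 2 * (e / 2) := by omega
        calc (s + s) * (e / 2) = s * (2 * (e / 2)) := by ring
          _ = s * e := by rw [← this]
      rw [this]

-- ===== VERDICT (by name: the statement is the Claim_ definition above) =====
theorem pow_polinome_spec : Claim_equal_pow_polinome := by
  intro a b P N _hDom hPre
  unfold Spec_pow_polinome
  obtain ⟨hP1, hP⟩ := hPre
  by_cases h1 : P = 1
  · subst h1
    rw [pow_polinome, pow_polinome_alt]
    norm_num
  · have hN : N ≠ 0 := by tauto
    have hP2 : 2 ≤ P := by omega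
    have hn : P = ((P.toNat : Nat) : Int) := by omega
    have hn2 : 2 ≤ P.toNat := by omega
    rw [pow_polinome_alt]
    have : (P == 1) = false := by simp [h1]
    rw [this]
    simp only [Bool.false_eq_true, if_false]
    rw [hn, A_eq N hN P.toNat a b hn2,
        loop_eq N hN a b P.toNat (by omega) 1 1 0 (PySem.Int.mod a N) (PySem.Int.mod b N)
          (by simpa [affpow] using cong_trans (cong_mod N a) (cong_of_eq (by ring : a = a * 1)))
          (by simpa [affpow] using cong_trans (cong_mod N b) (cong_of_eq (by ring : b = a * 0 + b)))]
    simp only [one_mul, mul_one, mul_zero, zero_add]
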